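-- pv_equiv track=rewrite | github.com/JerameeUC/Agentic-Chat-bot- | memory/rag/retriever.py | _extract_passage
-- ===== SOURCE A (Python) =====
-- from typing import Dict, Iterable, List, Optional, Tuple
--
-- def _find_all(term: str, text: str) -> List[int]:
--     """Return starting indices of all case-insensitive matches of term in text."""
--     if not term or not text:
--         return []
--     term_l = term.lower()
--     low = text.lower()
--     out: List[int] = []
--     i = low.find(term_l)
--     while i >= 0:
--         out.append(i)
--         i = low.find(term_l, i + 1)
--     return out
--
-- def _extract_passage(text: str, q_tokens: List[str], window: int = 350, overlap: int = 60) -> Tuple[int, int, str]: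
--     """
--     Pick a passage around the earliest match of any query token.
--     If no match found, return the first window.
--     """
--     if not text:
--         return 0, 0, ""
--
--     low = text.lower()
--     # choose the earliest hit among query tokens
--     hit_positions: List[int] = []
--     for qt in q_tokens:
--         hit_positions.extend(_find_all(qt, text))
--     start: int
--     end: int
--
--     if hit_positions:
--         i = max(0, min(hit_positions) - overlap)
--         start = i
--         end = min(len(text), start + window)
--     else:
--         start = 0
--         end = min(len(text), window)
--
--     return start, end, text[start:end].strip()
-- ===== SOURCE B (Python) =====
-- from typing import List, Tuple
--
-- def _extract_passage(text: str, q_tokens: List[str], window: int = 350, overlap: int = 60) -> Tuple[int, int, str]: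
--     """Passage around the earliest query-token hit: one lowercase find per
--     token (first occurrence only) instead of enumerating every occurrence."""
--     if not text:
--         return 0, 0, ""
--     low = text.lower()
--     firsts = [p for p in (low.find(t.lower()) for t in q_tokens if t) if p >= 0]
--     best = min(firsts, default=-1)
--     if best >= 0:
--         start = max(0, best - overlap)
--         end = min(len(text), start + window)
--     else:
--         start = 0
--         end = min(len(text), window)
--     return start, end, text[start:end].strip()
-- ===== Notes on version B (the rewrite author's own statement) =====
-- stated objective: faster
-- what changed: B does a single lowercase .find per non-empty token and takes min(..., default=-1), replacing A's helper that enumerates every occurrence of every token into one big list before taking its min.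
import Mathlib
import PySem

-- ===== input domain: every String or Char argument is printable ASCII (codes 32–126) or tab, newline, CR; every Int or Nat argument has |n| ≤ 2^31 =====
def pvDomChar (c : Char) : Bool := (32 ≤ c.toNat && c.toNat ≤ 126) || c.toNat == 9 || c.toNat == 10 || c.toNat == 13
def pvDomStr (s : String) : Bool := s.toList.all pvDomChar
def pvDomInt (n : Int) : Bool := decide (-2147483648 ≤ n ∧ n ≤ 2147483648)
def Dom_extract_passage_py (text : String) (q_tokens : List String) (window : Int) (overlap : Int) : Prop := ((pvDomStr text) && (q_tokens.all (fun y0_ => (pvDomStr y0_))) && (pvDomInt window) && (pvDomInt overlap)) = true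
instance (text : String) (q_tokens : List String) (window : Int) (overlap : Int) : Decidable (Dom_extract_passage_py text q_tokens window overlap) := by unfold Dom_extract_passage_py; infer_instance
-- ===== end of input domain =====

-- B replaces A's enumerate-all-occurrences helper by one first-occurrence find per
-- non-empty token and min(..., default=-1); same return value, fewer searches.

-- ===== PORT A =====
-- the `while i >= 0` loop of _find_all; fuel (low.length + 1) only makes the same
-- iteration total: positions strictly increase and are bounded by low.length
def pvFindAllLoop (low term_l : List Char) : Nat → Int → List Int
  | 0, _ => []
  | fuel + 1, i =>
      if 0 ≤ i then
        i :: pvFindAllLoop low term_l fuel (PySem.Chars.findFrom low term_l (i + 1))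
      else []

def pvFindAll (term text : String) : List Int :=
  if term = "" ∨ text = "" then []
  else
    let term_l := PySem.Chars.lower term.toList
    let low := PySem.Chars.lower text.toList
    pvFindAllLoop low term_l (low.length + 1) (PySem.Chars.find low term_l)

def extract_passage_py (text : String) (q_tokens : List String) (window : Int) (overlap : Int) : Int × Int × String :=
  if text = "" then (0, 0, "")
  else
    -- Python also binds `low = text.lower()` here but never uses it
    let hits := q_tokens.foldl (fun acc qt => acc ++ pvFindAll qt text) []
    match PySem.List.min? hits (fun x => x) with
    | some m =>
        let start := max 0 (m - overlap)
        let stop := min (PySem.Str.len text) (start + window)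
        (start, stop, PySem.Str.strip (PySem.Str.slice text (some start) (some stop)))
    | none =>
        let start : Int := 0
        let stop := min (PySem.Str.len text) window
        (start, stop, PySem.Str.strip (PySem.Str.slice text (some start) (some stop)))

-- ===== PORT B =====
def extract_passage_py_alt (text : String) (q_tokens : List String) (window : Int) (overlap : Int) : Int × Int × String :=
  if text = "" then (0, 0, "")
  else
    let low := PySem.Str.lower text
    let firsts := ((q_tokens.filter (fun t => t ≠ "")).map
        (fun t => PySem.Str.find low (PySem.Str.lower t))).filter (fun p => 0 ≤ p)
    let best := PySem.List.minD firsts (fun x => x) (-1)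
    if 0 ≤ best then
      let start := max 0 (best - overlap)
      let stop := min (PySem.Str.len text) (start + window)
      (start, stop, PySem.Str.strip (PySem.Str.slice text (some start) (some stop)))
    else
      let start : Int := 0
      let stop := min (PySem.Str.len text) window
      (start, stop, PySem.Str.strip (PySem.Str.slice text (some start) (some stop)))

-- ===== PRECONDITION & SPEC =====
def Spec_extract_passage_py (text : String) (q_tokens : List String) (window : Int) (overlap : Int) (out : Int × Int × String) : Prop := out = extract_passage_py_alt text q_tokens window overlap
instance (text : String) (q_tokens : List String) (window : Int) (overlap : Int) (out : Int × Int × String) : Decidable (Spec_extract_passage_py text q_tokens window overlap out) := by unfold Spec_extract_passage_py; infer_instance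

-- ===== CLAIM (what is proved, stated in full; the proofs are below) =====
def Claim_equal_extract_passage_py : Prop := ∀ (text : String) (q_tokens : List String) (window : Int) (overlap : Int), Dom_extract_passage_py text q_tokens window overlap → Spec_extract_passage_py text q_tokens window overlap (extract_passage_py text q_tokens window overlap)

-- ===== LEMMAS AND PROOFS =====

-- per-token "first hit" as an option (proof-only helper)
def pvFirstHit (low : List Char) (t : String) : Option Int :=
  if t = "" then none
  else
    let f := PySem.Chars.find low (PySem.Chars.lower t.toList)
    if 0 ≤ f then some f else none

-- option-min combiner (left op right, values only — Int has no ties to break)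
def pvOMin : Option Int → Option Int → Option Int
  | none, b => b
  | some a, none => some a
  | some a, some b => some (min a b)

theorem pvFindAllLoop_neg (low tl : List Char) (fuel : Nat) (i : Int) (h : ¬ 0 ≤ i) :
    pvFindAllLoop low tl fuel i = [] := by
  cases fuel <;> simp [pvFindAllLoop, h]

theorem pvFindFrom_ge (low tl : List Char) (i : Int) (h0 : 0 ≤ i)
    (h : 0 ≤ PySem.Chars.findFrom low tl (i + 1)) :
    i + 1 ≤ PySem.Chars.findFrom low tl (i + 1) := by
  have hk : i + 1 = ((i.toNat + 1 : Nat) : Int) := by omega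
  by_cases hle : i.toNat + 1 ≤ low.length
  · rw [hk] at h ⊢
    have := (PySem.Chars.findFrom_natCast_spec low tl (i.toNat + 1) hle (by omega)).1
    exact this
  · exfalso
    rw [hk] at h
    simp only [PySem.Chars.findFrom] at h
    omega

theorem pvFindAllLoop_ge (low tl : List Char) :
    ∀ (fuel : Nat) (i : Int), ∀ x ∈ pvFindAllLoop low tl fuel i, i ≤ x := by
  intro fuel
  induction fuel with
  | zero => intro i x hx; simp [pvFindAllLoop] at hx
  | succ n ih =>
      intro i x hx
      by_cases hi : 0 ≤ i
      · simp only [pvFindAllLoop, hi, if_true, List.mem_cons] at hx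
        rcases hx with rfl | hx
        · exact le_refl x
        · by_cases hj : 0 ≤ PySem.Chars.findFrom low tl (i + 1)
          · have h1 := pvFindFrom_ge low tl i hi hj
            have h2 := ih _ x hx
            omega
          · rw [pvFindAllLoop_neg low tl n _ hj] at hx
            simp at hx
      · rw [pvFindAllLoop_neg low tl (n+1) i hi] at hx
        simp at hx

theorem pvFoldlMin_of_le (l : List Int) (x : Int) (h : ∀ y ∈ l, x ≤ y) :
    l.foldl min x = x := by
  induction l with
  | nil => rfl
  | cons y t ih =>
      have hy : min x y = x := min_eq_left (h y (by simp))
      simp only [List.foldl_cons, hy]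
      exact ih (fun z hz => h z (by simp [hz]))

theorem pvFindAllLoop_min (low tl : List Char) (fuel : Nat) (i : Int) (h : 0 ≤ i) :
    PySem.List.min? (pvFindAllLoop low tl (fuel + 1) i) (fun x => x) = some i := by
  simp only [pvFindAllLoop, h, if_true]
  rw [PySem.List.min?_id_cons]
  congr 1
  apply pvFoldlMin_of_le
  intro y hy
  by_cases hj : 0 ≤ PySem.Chars.findFrom low tl (i + 1)
  · have h1 := pvFindFrom_ge low tl i h hj
    have h2 := pvFindAllLoop_ge low tl fuel _ y hy
    omega
  · rw [pvFindAllLoop_neg low tl fuel _ hj] at hy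
    simp at hy

theorem pvFindAll_min (t text : String) (htext : ¬ text = "") :
    PySem.List.min? (pvFindAll t text) (fun x => x)
      = pvFirstHit (PySem.Chars.lower text.toList) t := by
  by_cases ht : t = ""
  · simp [pvFindAll, pvFirstHit, ht, PySem.List.min?]
  · simp only [pvFindAll, pvFirstHit, ht, htext, or_self, if_false]
    by_cases hf : 0 ≤ PySem.Chars.find (PySem.Chars.lower text.toList) (PySem.Chars.lower t.toList)
    · simp only [hf, if_true]
      exact pvFindAllLoop_min _ _ _ _ hf
    · simp only [hf, if_false]
      rw [pvFindAllLoop_neg _ _ _ _ hf]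
      rfl

-- min? over append is pvOMin of the two min?'s (Int, identity key)
theorem pvMin?_append (xs ys : List Int) :
    PySem.List.min? (xs ++ ys) (fun x => x)
      = pvOMin (PySem.List.min? xs (fun x => x)) (PySem.List.min? ys (fun x => x)) := by
  cases xs with
  | nil => simp [PySem.List.min?, pvOMin]
  | cons x xt =>
      rw [List.cons_append, PySem.List.min?_id_cons, PySem.List.min?_id_cons]
      rw [List.foldl_append]
      cases ys with
      | nil => simp [PySem.List.min?, pvOMin]
      | cons y yt =>
          rw [PySem.List.min?_id_cons]
          simp only [pvOMin, List.foldl_cons]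
          congr 1
          have : ∀ (l : List Int) (a b : Int),
              l.foldl min (min a b) = min a (l.foldl min b) := by
            intro l
            induction l with
            | nil => intro a b; rfl
            | cons z t ih =>
                intro a b
                simp only [List.foldl_cons, min_assoc]
                exact ih a (min b z)
          have h2 := this yt (xt.foldl min x) y
          simpa using h2

theorem pvFlatMap_min (text : String) (htext : ¬ text = "") (q : List String) :
    PySem.List.min? (q.flatMap (fun qt => pvFindAll qt text)) (fun x => x)
      = PySem.List.min? (q.filterMap (pvFirstHit (PySem.Chars.lower text.toList))) (fun x => x) := by
  induction q with
  | nil => rfl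
  | cons t qt ih =>
      rw [List.flatMap_cons, pvMin?_append, pvFindAll_min t text htext, ih]
      cases hgt : pvFirstHit (PySem.Chars.lower text.toList) t with
      | none => simp [pvOMin, hgt]
      | some v =>
          simp only [List.filterMap_cons, hgt]
          have : (v :: qt.filterMap (pvFirstHit (PySem.Chars.lower text.toList)))
              = [v] ++ qt.filterMap (pvFirstHit (PySem.Chars.lower text.toList)) := rfl
          rw [this, pvMin?_append]
          simp [PySem.List.min?, pvOMin]

-- B's list comprehension is exactly filterMap pvFirstHit
theorem pvFirsts_eq (text : String) (q : List String) :
    ((q.filter (fun t => t ≠ "")).map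
        (fun t => PySem.Str.find (PySem.Str.lower text) (PySem.Str.lower t))).filter (fun p => 0 ≤ p)
      = q.filterMap (pvFirstHit (PySem.Chars.lower text.toList)) := by
  induction q with
  | nil => rfl
  | cons t qt ih =>
      by_cases ht : t = ""
      · simpa [ht, pvFirstHit, List.filterMap_cons] using ih
      · simp only [PySem.Str.find_eq, PySem.Str.toList_lower] at ih
        by_cases hp : 0 ≤ PySem.Chars.find (PySem.Chars.lower text.toList) (PySem.Chars.lower t.toList)
        · have hhead : pvFirstHit (PySem.Chars.lower text.toList) t
              = some (PySem.Chars.find (PySem.Chars.lower text.toList) (PySem.Chars.lower t.toList)) := by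
            simp [pvFirstHit, ht, hp]
          simp [hhead, ht, hp]
          simpa using ih
        · have hhead : pvFirstHit (PySem.Chars.lower text.toList) t = none := by
            simp [pvFirstHit, ht, hp]
          simp [hhead, ht, hp]
          simpa using ih

theorem pvMin?_nonneg (l : List Int) (h : ∀ x ∈ l, 0 ≤ x) (m : Int)
    (hm : PySem.List.min? l (fun x => x) = some m) : 0 ≤ m :=
  h m (PySem.List.min?_mem hm)

-- ===== VERDICT (by name: the statement is the Claim_ definition above) =====
theorem extract_passage_py_spec : Claim_equal_extract_passage_py := by
  intro text q_tokens window overlap _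
  unfold Spec_extract_passage_py
  by_cases htext : text = ""
  · simp [extract_passage_py, extract_passage_py_alt, htext]
  · simp only [extract_passage_py, extract_passage_py_alt, htext, if_false]
    rw [PySem.List.foldl_append_eq_flatMap, List.nil_append]
    rw [pvFirsts_eq text q_tokens]
    have hmin := pvFlatMap_min text htext q_tokens
    simp only [PySem.List.minD]
    rw [← hmin]
    cases hc : PySem.List.min? (q_tokens.flatMap (fun qt => pvFindAll qt text)) (fun x => x) with
    | none => norm_num
    | some m =>
        have h0 : 0 ≤ m := by
          apply pvMin?_nonneg _ _ m hc
          intro x hx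
          simp only [List.mem_flatMap] at hx
          obtain ⟨t, _, hxt⟩ := hx
          unfold pvFindAll at hxt
          by_cases hcase : t = "" ∨ text = ""
          · simp [hcase] at hxt
          · simp only [hcase, if_false] at hxt
            have h1 := pvFindAllLoop_ge _ _ _ _ x hxt
            have h2 : ∀ fuel i, x ∈ pvFindAllLoop (PySem.Chars.lower text.toList)
                (PySem.Chars.lower t.toList) fuel i → 0 ≤ i := by
              intro fuel i hmem
              by_contra hneg
              rw [pvFindAllLoop_neg _ _ _ _ hneg] at hmem
              simp at hmem
            have := h2 _ _ hxt
            omega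
        simp [h0]
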